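-- pv_equiv track=rewrite | github.com/atomless/Shuma-Gorath | scripts/tests/adversarial_runner/realism.py | partition_activity_budget
-- ===== SOURCE A (Python) =====
-- def partition_activity_budget(total_activities: int, burst_size: int) -> list[int]:
--     normalized_total = max(0, int(total_activities))
--     normalized_burst = max(1, int(burst_size))
--     bursts: list[int] = []
--     remaining = normalized_total
--     while remaining > 0:
--         current = min(normalized_burst, remaining)
--         bursts.append(current)
--         remaining -= current
--     return bursts
-- ===== SOURCE B (Python) =====
-- def partition_activity_budget(total_activities: int, burst_size: int) -> list[int]:
--     normalized_total = max(0, int(total_activities))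
--     normalized_burst = max(1, int(burst_size))
--     full, rem = divmod(normalized_total, normalized_burst)
--     return [normalized_burst] * full + ([rem] if rem else [])
-- ===== Notes on version B (the rewrite author's own statement) =====
-- stated objective: idiomatic
-- what changed: Replaces the repeated-subtraction while loop with closed-form divmod arithmetic: full // chunks plus an optional remainder chunk.
import Mathlib
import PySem

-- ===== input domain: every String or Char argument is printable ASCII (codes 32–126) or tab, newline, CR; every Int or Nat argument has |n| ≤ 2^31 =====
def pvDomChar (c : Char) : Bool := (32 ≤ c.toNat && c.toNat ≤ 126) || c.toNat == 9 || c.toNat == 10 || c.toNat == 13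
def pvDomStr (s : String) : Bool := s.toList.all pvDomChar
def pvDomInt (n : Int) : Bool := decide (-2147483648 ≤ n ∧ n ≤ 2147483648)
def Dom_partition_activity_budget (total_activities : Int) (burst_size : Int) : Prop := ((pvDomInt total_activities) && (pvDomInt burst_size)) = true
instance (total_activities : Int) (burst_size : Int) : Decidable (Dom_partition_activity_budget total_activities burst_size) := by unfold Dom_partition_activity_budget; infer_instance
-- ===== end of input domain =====

-- ===== PORT A =====
-- B changes the return value computation only; neither version mutates anything.
-- while remaining > 0: append min(burst, remaining); remaining -= current
def pvLoop_partition (normalized_burst : Int) (hb : 1 ≤ normalized_burst)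
    (bursts : List Int) (remaining : Int) : List Int :=
  if _h : remaining > 0 then
    let current := min normalized_burst remaining
    pvLoop_partition normalized_burst hb (bursts ++ [current]) (remaining - current)
  else bursts
termination_by remaining.toNat
decreasing_by
  have h1 : 1 ≤ min normalized_burst remaining := le_min hb _h
  omega

def partition_activity_budget (total_activities : Int) (burst_size : Int) : List Int :=
  let normalized_total := max 0 total_activities
  let normalized_burst := max 1 burst_size
  pvLoop_partition normalized_burst (le_max_left 1 burst_size) [] normalized_total

-- ===== PORT B =====
def partition_activity_budget_alt (total_activities : Int) (burst_size : Int) : List Int :=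
  let normalized_total := max 0 total_activities
  let normalized_burst := max 1 burst_size
  let full := PySem.Int.floordiv normalized_total normalized_burst
  let rem := PySem.Int.mod normalized_total normalized_burst
  List.replicate full.toNat normalized_burst ++ (if rem ≠ 0 then [rem] else [])

-- ===== PRECONDITION & SPEC =====
def Spec_partition_activity_budget (total_activities : Int) (burst_size : Int) (out : List Int) : Prop := out = partition_activity_budget_alt total_activities burst_size
instance (total_activities : Int) (burst_size : Int) (out : List Int) : Decidable (Spec_partition_activity_budget total_activities burst_size out) := by unfold Spec_partition_activity_budget; infer_instance

-- ===== CLAIM (what is proved, stated in full; the proofs are below) =====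
def Claim_equal_partition_activity_budget : Prop := ∀ (total_activities : Int) (burst_size : Int), Dom_partition_activity_budget total_activities burst_size → Spec_partition_activity_budget total_activities burst_size (partition_activity_budget total_activities burst_size)

-- ===== LEMMAS AND PROOFS =====
-- The subtraction loop, started at any r ≥ 0 with burst b ≥ 1, appends r/b copies of b and the remainder.
theorem pvLoop_eq (b : Int) (hb : 1 ≤ b) :
    ∀ (n : Nat) (r : Int), r = (n : Int) → ∀ (acc : List Int),
      pvLoop_partition b hb acc r =
        acc ++ List.replicate (PySem.Int.floordiv r b).toNat b ++
          (if PySem.Int.mod r b ≠ 0 then [PySem.Int.mod r b] else []) := by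
  intro n
  induction n using Nat.strong_induction_on with
  | _ n ih =>
    intro r hr acc
    rw [pvLoop_partition]
    rw [PySem.Int.floordiv_eq_ediv_of_pos (by omega), PySem.Int.mod_eq_emod_of_pos (by omega)]
    by_cases h : r > 0
    · simp only [h, dif_pos]
      rcases le_or_gt r b with hrb | hrb
      · -- final chunk: current = r, remaining becomes 0
        have hmin : min b r = r := min_eq_right hrb
        rw [hmin]
        have hz : r - r = 0 := by ring
        rw [hz, pvLoop_partition]
        simp only [gt_iff_lt, lt_irrefl, dif_neg, not_false_iff]
        rcases eq_or_lt_of_le hrb with he | hlt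
        · subst he
          have h1 : r / r = 1 := Int.ediv_self (by omega)
          have h2 : r % r = 0 := Int.emod_self
          simp [h1]
        · have h1 : r / b = 0 := Int.ediv_eq_zero_of_lt (by omega) hlt
          have h2 : r % b = r := Int.emod_eq_of_lt (by omega) hlt
          simp [h1, h2, h.ne']
      · -- full chunk: current = b, recurse on r - b
        have hmin : min b r = b := min_eq_left (by omega)
        rw [hmin]
        have hn : r - b = ((n - b.toNat : Nat) : Int) := by omega
        rw [ih (n - b.toNat) (by omega) (r - b) hn (acc ++ [b])]
        rw [PySem.Int.floordiv_eq_ediv_of_pos (by omega), PySem.Int.mod_eq_emod_of_pos (by omega)]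
        have hdiv : r / b = (r - b) / b + 1 := by
          rw [show r = (r - b) + 1 * b by ring, Int.add_mul_ediv_right _ _ (by omega : b ≠ 0)]
          ring_nf
        have hmod : r % b = (r - b) % b := (Int.sub_emod_right r b).symm
        have htn : (r / b).toNat = ((r - b) / b).toNat + 1 := by
          have : 0 ≤ (r - b) / b := Int.ediv_nonneg (by omega) (by omega)
          omega
        rw [hmod, htn, List.replicate_succ]
        simp [List.append_assoc]
    · simp only [h, dif_neg, not_false_iff]
      have hr0 : r = 0 := by omega
      simp [hr0]

-- ===== VERDICT (by name: the statement is the Claim_ definition above) =====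
theorem partition_activity_budget_spec : Claim_equal_partition_activity_budget := by
  intro t s _
  unfold Spec_partition_activity_budget partition_activity_budget partition_activity_budget_alt
  exact pvLoop_eq (max 1 s) (le_max_left _ _) (max 0 t).toNat (max 0 t) (by omega) []
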